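-- pv_equiv track=rewrite | github.com/use/bluecandle | list_tricks.py | numberize_duplicates
-- ===== SOURCE A (Python) =====
-- def numberize_duplicates(l):
--     found_items = {}
--     new_list = []
--     for item in l:
--         if item in found_items:
--             found_items[item] += 1
--             num = found_items[item]
--             name = item + " #" + str(num)
--         else:
--             found_items[item] = 1
--             name = item
--         new_list.append(name)
--     return new_list
-- ===== SOURCE B (Python) =====
-- def numberize_duplicates(l):
--     def tag(i, x):
--         c = l[:i + 1].count(x)
--         return x if c == 1 else x + " #" + str(c)
--     return [tag(i, x) for i, x in enumerate(l)]
-- ===== Notes on version B (the rewrite author's own statement) =====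
-- stated objective: simpler
-- what changed: Replaces the streaming dict-of-counts accumulator loop with a stateless per-index comprehension that recounts each item's occurrences in the prefix l[:i+1].
import Mathlib
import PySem

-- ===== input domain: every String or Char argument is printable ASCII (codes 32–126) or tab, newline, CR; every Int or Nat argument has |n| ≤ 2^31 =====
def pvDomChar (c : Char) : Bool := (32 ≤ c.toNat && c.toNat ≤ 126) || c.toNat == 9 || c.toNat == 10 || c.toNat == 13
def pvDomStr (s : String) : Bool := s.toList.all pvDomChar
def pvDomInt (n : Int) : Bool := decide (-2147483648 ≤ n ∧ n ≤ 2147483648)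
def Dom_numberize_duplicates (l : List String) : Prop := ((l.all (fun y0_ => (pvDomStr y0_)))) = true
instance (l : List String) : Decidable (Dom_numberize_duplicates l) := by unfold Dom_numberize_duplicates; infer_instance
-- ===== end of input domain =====

-- B replaces A's streaming dict-of-counts loop with a stateless per-index prefix recount (simpler decomposition, not faster).

-- ===== PORT A =====
def numberize_duplicates (l : List String) : List String :=
  (l.foldl
    (fun (s : PySem.Dict String Int × List String) item =>
      if s.1.contains item then
        let found := s.1.insert item (s.1.getD item 0 + 1)
        let num := found.getD item 0
        (found, s.2 ++ [item ++ " #" ++ PySem.Int.toStr num])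
      else
        (s.1.insert item 1, s.2 ++ [item]))
    (PySem.Dict.empty, [])).2

-- ===== PORT B =====
def nd_tag (l : List String) (i : Int) (x : String) : String :=
  let c : Int := (PySem.List.count (PySem.List.slice l none (some (i + 1))) x : Int)
  if c = 1 then x else x ++ " #" ++ PySem.Int.toStr c

def numberize_duplicates_alt (l : List String) : List String :=
  (PySem.List.enumerate l).map (fun p => nd_tag l p.1 p.2)

-- ===== PRECONDITION & SPEC =====
def Spec_numberize_duplicates (l : List String) (out : List String) : Prop := out = numberize_duplicates_alt l
instance (l : List String) (out : List String) : Decidable (Spec_numberize_duplicates l out) := by unfold Spec_numberize_duplicates; infer_instance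

-- ===== CLAIM (what is proved, stated in full; the proofs are below) =====
def Claim_equal_numberize_duplicates : Prop := ∀ (l : List String), Dom_numberize_duplicates l → Spec_numberize_duplicates l (numberize_duplicates l)

-- ===== LEMMAS AND PROOFS =====

-- common specification: number each element by its occurrence count after a history h
def pvNumWith (h : List String) : List String → List String
  | [] => []
  | x :: t =>
    (if ((h.count x : Int) + 1) = 1 then x
     else x ++ " #" ++ PySem.Int.toStr ((h.count x : Int) + 1)) :: pvNumWith (h ++ [x]) t

-- A's loop body, named so the invariant proof can rewrite one step at a time
def pvStep (s : PySem.Dict String Int × List String) (item : String) :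
    PySem.Dict String Int × List String :=
  if s.1.contains item then
    let found := s.1.insert item (s.1.getD item 0 + 1)
    let num := found.getD item 0
    (found, s.2 ++ [item ++ " #" ++ PySem.Int.toStr num])
  else
    (s.1.insert item 1, s.2 ++ [item])

lemma pvA_eq_step (l : List String) :
    numberize_duplicates l = (l.foldl pvStep (PySem.Dict.empty, [])).2 := rfl

lemma pvA_loop (t : List String) : ∀ (h : List String) (d : PySem.Dict String Int) (acc : List String),
    (∀ y, d.getD y 0 = (h.count y : Int)) →
    (∀ y, d.contains y = decide (y ∈ h)) →
    (t.foldl pvStep (d, acc)).2 = acc ++ pvNumWith h t := by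
  induction t with
  | nil => intro h d acc _ _; simp [pvNumWith]
  | cons x t ih =>
    intro h d acc hg hc
    rw [List.foldl_cons, pvNumWith]
    by_cases hx : x ∈ h
    · have hcx : d.contains x = true := by rw [hc]; simpa
      have hcount : h.count x ≠ 0 := by simpa [List.count_eq_zero] using hx
      have hstep : pvStep (d, acc) x
          = (d.insert x ((h.count x : Int) + 1),
             acc ++ [x ++ " #" ++ PySem.Int.toStr ((h.count x : Int) + 1)]) := by
        unfold pvStep
        simp only [hcx, if_true, PySem.Dict.getD_insert_self, hg x]
      have htest : ¬ (((h.count x : Int) + 1) = 1) := by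
        intro e; apply hcount; omega
      rw [hstep, if_neg htest, ih (h ++ [x]) _ _ ?_ ?_]
      · simp
      · intro y
        rw [PySem.Dict.getD_insert]
        by_cases hyx : y = x
        · subst hyx; simp [List.count_append]
        · simp [hyx, hg y, List.count_append, Ne.symm hyx]
      · intro y
        rw [PySem.Dict.contains_insert, hc]
        by_cases hyx : y = x <;> simp [hyx]
    · have hcx : d.contains x = false := by rw [hc]; simpa
      have hcount : h.count x = 0 := by simpa [List.count_eq_zero] using hx
      have hstep : pvStep (d, acc) x = (d.insert x 1, acc ++ [x]) := by
        unfold pvStep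
        simp [hcx]
      have htest : ((h.count x : Int) + 1) = 1 := by rw [hcount]; simp
      rw [hstep, if_pos htest, ih (h ++ [x]) _ _ ?_ ?_]
      · simp
      · intro y
        rw [PySem.Dict.getD_insert]
        by_cases hyx : y = x
        · subst hyx; simp [List.count_append, hcount]
        · simp [hyx, hg y, List.count_append, Ne.symm hyx]
      · intro y
        rw [PySem.Dict.contains_insert, hc]
        by_cases hyx : y = x <;> simp [hyx]

lemma pvA_eq (l : List String) : numberize_duplicates l = pvNumWith [] l := by
  rw [pvA_eq_step, pvA_loop l [] PySem.Dict.empty []]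
  · simp
  · intro y; simp
  · intro y; simp

lemma pvB_suffix (t : List String) : ∀ h : List String,
    (PySem.List.enumerate t (h.length : Int)).map (fun p => nd_tag (h ++ t) p.1 p.2)
      = pvNumWith h t := by
  induction t with
  | nil => intro h; simp [PySem.List.enumerate_nil]; rfl
  | cons x t ih =>
    intro h
    rw [PySem.List.enumerate_cons]
    simp only [List.map_cons, pvNumWith]
    congr 1
    · show nd_tag (h ++ x :: t) (h.length : Int) x = _
      unfold nd_tag
      have hslice : PySem.List.slice (h ++ x :: t) none (some ((h.length : Int) + 1))
          = h ++ [x] := by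
        have hcast : ((h.length : Int) + 1) = ((h.length + 1 : Nat) : Int) := by push_cast; ring
        rw [hcast, PySem.List.slice_to_natCast, List.take_append]
        simp
      rw [hslice, PySem.List.count_eq]
      simp only [List.count_append, List.count_singleton_self]
      push_cast
      rfl
    · have := ih (h ++ [x])
      simpa [List.append_assoc] using this

lemma pvB_eq (l : List String) : numberize_duplicates_alt l = pvNumWith [] l := by
  have := pvB_suffix l []
  simpa [numberize_duplicates_alt] using this

-- ===== VERDICT (by name: the statement is the Claim_ definition above) =====
theorem numberize_duplicates_spec : Claim_equal_numberize_duplicates := by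
  intro l _
  show numberize_duplicates l = numberize_duplicates_alt l
  rw [pvA_eq, pvB_eq]
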